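-- pv_equiv track=rewrite | github.com/bohuiKang/SSAFY-Algorithm-Study | 2603_march/mar_week1/봉인된 주문/bh_ sealed_spell.py | solution
-- ===== SOURCE A (Python) =====
-- def solution(n, bans): # n번째 주문 찾기, 삭제된 주문 담은 bans
--
--     bans_num = []
--     for ban in bans:
--         bans_num.append(str_to_num(ban))
--
--     bans_num = sorted(bans_num) # 오름차순 정렬
--
--     find_n = n
--     for b_n in bans_num:
--         if b_n <= find_n:
--             find_n += 1 # 앞의 숫자가 사라졌으니 찾는 숫자는 사라진 숫자 만큼 뒤로 이동
--         else:
--             break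
--
--     return num_to_str(find_n)
--
-- def str_to_num(ban):
--     num = 0
--     for s in ban:
--         num = num * 26 + (ord(s) - ord('a') + 1) # 아스키 코드 변환
--     return num
--
-- def num_to_str(n):
--     char = []
--     while n > 0:
--         n -= 1
--         char.append(chr(ord('a') + (n % 26))) # 나머지를 변환
--         n //= 26 # 몫을 남김
--
--     return "".join(reversed(char))
-- ===== SOURCE B (Python) =====
-- def solution(n, bans):
--     # Kleene iteration: drive x to the least fixed point x = n + #{b in bans : b <= x};
--     # no sorting and no incremental shift. len(bans)+1 rounds always suffice.
--     nums = [str_to_num(ban) for ban in bans]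
--     x = n
--     for _ in range(len(nums) + 1):
--         y = n + sum(1 for b in nums if b <= x)
--         if y == x:
--             break
--         x = y
--     return num_to_str(x)
--
-- def str_to_num(ban):
--     num = 0
--     for s in ban:
--         num = num * 26 + (ord(s) - ord('a') + 1)
--     return num
--
-- def num_to_str(n):
--     char = []
--     while n > 0:
--         n -= 1
--         char.append(chr(ord('a') + (n % 26)))
--         n //= 26
--
--     return "".join(reversed(char))
-- ===== Notes on version B (the rewrite author's own statement) =====
-- stated objective: alternative
-- what changed: A sorts the ban numbers and shifts the target with a linear scan-and-break; B never sorts and instead drives x to the least fixed point x = n + #{b in bans : b <= x} by Kleene iteration over the unsorted list, stopping when a round leaves x unchanged (at most len(bans)+1 rounds).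
import Mathlib
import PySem

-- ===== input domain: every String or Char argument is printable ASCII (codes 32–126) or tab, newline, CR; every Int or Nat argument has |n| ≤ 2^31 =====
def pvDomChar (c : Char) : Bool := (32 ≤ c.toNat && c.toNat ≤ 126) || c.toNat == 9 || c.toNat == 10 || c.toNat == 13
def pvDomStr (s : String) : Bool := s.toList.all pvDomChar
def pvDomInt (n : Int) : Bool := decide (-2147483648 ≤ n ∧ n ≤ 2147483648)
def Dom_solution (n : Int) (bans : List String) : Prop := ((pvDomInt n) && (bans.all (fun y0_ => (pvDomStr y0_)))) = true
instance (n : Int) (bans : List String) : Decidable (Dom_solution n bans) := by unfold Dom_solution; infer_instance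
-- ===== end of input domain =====

-- B replaces A's sort + incremental shift loop by an unsorted Kleene iteration to the least
-- fixed point x = n + #{b ∈ bans : b ≤ x} (objective: alternative algorithm, not faster).

-- ===== PORT A =====
-- shared helper str_to_num (identical in Source A and Source B)
def strToNum (ban : String) : Int :=
  ban.toList.foldl (fun num s => num * 26 + ((s.toNat : Int) - 97 + 1)) 0

-- shared helper num_to_str (identical in Source A and Source B): while n > 0: n -= 1; append; n //= 26
def numToStrGo (n : Int) (char : List Char) : List Char :=
  if _h : n > 0 then
    numToStrGo (PySem.Int.floordiv (n - 1) 26)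
      (char ++ [Char.ofNat (97 + (PySem.Int.mod (n - 1) 26)).toNat])
  else char
termination_by n.toNat
decreasing_by
  have h26 : (0:Int) < 26 := by norm_num
  rw [PySem.Int.floordiv_eq_ediv_of_pos h26]
  have h1 : 0 ≤ (n - 1) / 26 := Int.ediv_nonneg (by omega) (by omega)
  have h2 : (n - 1) / 26 ≤ n - 1 := Int.ediv_le_self _ (by omega)
  omega

def numToStr (n : Int) : String := String.ofList (numToStrGo n []).reverse

-- A's for-loop over the sorted bans with break
def loopA : List Int → Int → Int
  | [], find_n => find_n
  | b_n :: rest, find_n => if b_n ≤ find_n then loopA rest (find_n + 1) else find_n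

def solution (n : Int) (bans : List String) : String :=
  let bansNum := bans.foldl (fun acc ban => acc ++ [strToNum ban]) []
  let bansNum := PySem.List.sorted bansNum (fun x => x) false
  numToStr (loopA bansNum n)

-- ===== PORT B =====
-- sum(1 for b in nums if b <= x)
def countLe (nums : List Int) (x : Int) : Int :=
  nums.foldl (fun acc b => if b ≤ x then acc + 1 else acc) 0

-- for _ in range(len(nums)+1): y = n + count; if y == x: break; x = y
def iterB (n : Int) (nums : List Int) : Nat → Int → Int
  | 0, x => x
  | k + 1, x =>
    let y := n + countLe nums x
    if y = x then x else iterB n nums k y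

def solution_alt (n : Int) (bans : List String) : String :=
  let nums := bans.map strToNum
  numToStr (iterB n nums (nums.length + 1) n)

-- ===== PRECONDITION & SPEC =====
def Spec_solution (n : Int) (bans : List String) (out : String) : Prop := out = solution_alt n bans
instance (n : Int) (bans : List String) (out : String) : Decidable (Spec_solution n bans out) := by unfold Spec_solution; infer_instance

-- ===== CLAIM (what is proved, stated in full; the proofs are below) =====
def Claim_equal_solution : Prop := ∀ (n : Int) (bans : List String), Dom_solution n bans → Spec_solution n bans (solution n bans)

-- ===== LEMMAS AND PROOFS =====

theorem foldl_append_singleton_eq_map {α β : Type} (f : α → β) :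
    ∀ (l : List α) (acc : List β),
      l.foldl (fun a x => a ++ [f x]) acc = acc ++ l.map f := by
  intro l
  induction l with
  | nil => intro acc; simp
  | cons x xs ih => intro acc; simp [List.foldl, ih]

theorem countLe_eq_countP (l : List Int) (x : Int) :
    countLe l x = ((l.countP (fun b => decide (b ≤ x)) : Nat) : Int) := by
  have key : ∀ (l : List Int) (acc : Int),
      l.foldl (fun acc b => if b ≤ x then acc + 1 else acc) acc
        = acc + ((l.countP (fun b => decide (b ≤ x)) : Nat) : Int) := by
    intro l
    induction l with
    | nil => intro acc; simp
    | cons b bs ih =>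
      intro acc
      by_cases hb : b ≤ x
      · simp [List.foldl, hb, ih]
        ring
      · simp [List.foldl, hb, ih]
  simpa using key l 0

theorem countLe_perm {l l' : List Int} (h : l.Perm l') (x : Int) :
    countLe l x = countLe l' x := by
  rw [countLe_eq_countP, countLe_eq_countP, h.countP_eq]

theorem countLe_nonneg (l : List Int) (x : Int) : 0 ≤ countLe l x := by
  rw [countLe_eq_countP]; positivity

theorem countLe_le_length (l : List Int) (x : Int) : countLe l x ≤ (l.length : Int) := by
  rw [countLe_eq_countP]
  exact_mod_cast List.countP_le_length

theorem countLe_mono (l : List Int) {x y : Int} (h : x ≤ y) :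
    countLe l x ≤ countLe l y := by
  rw [countLe_eq_countP, countLe_eq_countP]
  exact_mod_cast List.countP_mono_left (by intro a _ ha; simp_all; omega)

theorem loopA_ge : ∀ (S : List Int) (f : Int), f ≤ loopA S f := by
  intro S
  induction S with
  | nil => intro f; simp [loopA]
  | cons b rest ih =>
    intro f
    simp only [loopA]
    split_ifs with hb
    · have := ih (f + 1); omega
    · omega

theorem loopA_fixed : ∀ (S : List Int) (f : Int), S.Pairwise (· ≤ ·) →
    loopA S f = f + countLe S (loopA S f) := by
  intro S
  induction S with
  | nil => intro f _; simp [loopA, countLe]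
  | cons b rest ih =>
    intro f hp
    have hp' := (List.pairwise_cons.mp hp).2
    have hball := (List.pairwise_cons.mp hp).1
    simp only [loopA]
    split_ifs with hb
    · have hge : f + 1 ≤ loopA rest (f + 1) := loopA_ge rest (f + 1)
      have hble : b ≤ loopA rest (f + 1) := by omega
      have hc : countLe (b :: rest) (loopA rest (f + 1))
          = 1 + countLe rest (loopA rest (f + 1)) := by
        rw [countLe_eq_countP, countLe_eq_countP, List.countP_cons]
        simp [hble]; ring
      rw [hc]
      have := ih (f + 1) hp'
      omega
    · -- b > f, and every element of rest is ≥ b > f, so the count at f is 0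
      have hc : countLe (b :: rest) f = 0 := by
        rw [countLe_eq_countP]
        have : (b :: rest).countP (fun c => decide (c ≤ f)) = 0 := by
          rw [List.countP_eq_zero]
          intro c hc
          rcases List.mem_cons.mp hc with rfl | hmem
          · simp; omega
          · have := hball c hmem; simp; omega
        simp [this]
      omega

theorem loopA_least : ∀ (S : List Int) (f y : Int),
    f + countLe S y ≤ y → loopA S f ≤ y := by
  intro S
  induction S with
  | nil => intro f y h; simpa [loopA, countLe] using h
  | cons b rest ih =>
    intro f y h
    have hcnn : 0 ≤ countLe (b :: rest) y := countLe_nonneg _ _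
    simp only [loopA]
    split_ifs with hb
    · have hby : b ≤ y := by omega
      have hc : countLe (b :: rest) y = 1 + countLe rest y := by
        rw [countLe_eq_countP, countLe_eq_countP, List.countP_cons]
        simp [hby]
        omega
      exact ih (f + 1) y (by omega)
    · omega

-- B's bounded fixed-point iteration reaches a, A's least fixed point
theorem iterB_eq (n : Int) (nums : List Int) (a : Int)
    (hga : n + countLe nums a = a)
    (hleast : ∀ y, n + countLe nums y ≤ y → a ≤ y) :
    ∀ (k : Nat) (x : Int), n ≤ x → x ≤ a → a ≤ x + (k : Int) →
      iterB n nums k x = a := by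
  intro k
  induction k with
  | zero => intro x _ h2 h3; simp only [iterB]; omega
  | succ k ih =>
    intro x h1 h2 h3
    simp only [iterB]
    by_cases hyx : n + countLe nums x = x
    · have : a ≤ x := hleast x (by omega)
      simp [hyx]; omega
    · have hnn : 0 ≤ countLe nums x := countLe_nonneg _ _
      have hmono : countLe nums x ≤ countLe nums a := countLe_mono nums h2
      have hgt : x < n + countLe nums x := by
        by_contra hle
        have hax : a ≤ x := hleast x (by omega)
        have : x = a := by omega
        subst this
        omega
      simp only [hyx, if_false]
      exact ih (n + countLe nums x) (by omega) (by omega) (by push_cast at h3 ⊢; omega)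

theorem solution_eq : ∀ (n : Int) (bans : List String),
    solution n bans = solution_alt n bans := by
  intro n bans
  unfold solution solution_alt
  rw [foldl_append_singleton_eq_map]
  set nums := bans.map strToNum with hnums
  simp only [List.nil_append]
  set S := PySem.List.sorted nums (fun x => x) false with hS
  set a := loopA S n with ha
  have hperm : S.Perm nums := PySem.List.sorted_perm nums (fun x => x) false
  have hpw : S.Pairwise (· ≤ ·) := by
    have := PySem.List.sorted_pairwise (xs := nums) (key := fun x : Int => x)
    simpa using this
  have hcount : ∀ y, countLe S y = countLe nums y := fun y => countLe_perm hperm y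
  have hga : n + countLe nums a = a := by
    have h := loopA_fixed S n hpw
    rw [hcount] at h
    rw [ha]
    omega
  have hleast : ∀ y, n + countLe nums y ≤ y → a ≤ y := by
    intro y hy
    rw [ha]
    exact loopA_least S n y (by rw [hcount]; omega)
  have hna : n ≤ a := ha ▸ loopA_ge S n
  have hub : a ≤ n + (nums.length : Int) := by
    have := countLe_le_length nums a
    omega
  have : iterB n nums (nums.length + 1) n = a :=
    iterB_eq n nums a hga hleast (nums.length + 1) n (le_refl n) hna
      (by push_cast; omega)
  rw [this]

-- ===== VERDICT (by name: the statement is the Claim_ definition above) =====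
theorem solution_spec : Claim_equal_solution := by
  intro n bans _
  unfold Spec_solution
  exact solution_eq n bans
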